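-- pv_equiv track=rewrite | github.com/skoranda/satosa_microservices | src/satosa/micro_services/idp_metadata_attribute_store.py | _first_lang_element_text
-- ===== SOURCE A (Python) =====
-- def _first_lang_element_text(elements, lang='en'):
--     """
--     Loop over the list representing XML elements that contain text and find
--     the first text value for the input lang where 'en' or English is the
--     default lang.
--
--     Each item in the list is a dictionary with keys
--
--         __class__
--         lang
--         text
--
--     as expected from the metadata returned for an entity by the MetadataStore
--     class from pysaml2.
--
--     If no element has the input lang then return the text from the first
--     element.
--
--     If no element has text then return an empty string.
--     """
--     for e in elements:
--         if lang in e: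
--             if 'text' in e:
--                 return e['text']
--
--     for e in elements:
--         if 'text' in e:
--             return e['text']
--
--     return ''
-- ===== SOURCE B (Python) =====
-- def _first_lang_element_text(elements, lang='en'):
--     # Single pass: return immediately on the first element with both lang and
--     # text; otherwise remember the first element with text as a fallback.
--     found = False
--     fallback = None
--     for e in elements:
--         if 'text' in e:
--             if lang in e:
--                 return e['text']
--             if not found:
--                 fallback = e['text']
--                 found = True
--     return fallback if found else ''
-- ===== Notes on version B (the rewrite author's own statement) =====
-- stated objective: simpler
-- what changed: Replaces A's two sequential scans (first for an element with both lang and text, then for any element with text) by one single pass that returns early on a lang match and tracks the first text value as a fallback with an explicit found flag.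
import Mathlib
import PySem

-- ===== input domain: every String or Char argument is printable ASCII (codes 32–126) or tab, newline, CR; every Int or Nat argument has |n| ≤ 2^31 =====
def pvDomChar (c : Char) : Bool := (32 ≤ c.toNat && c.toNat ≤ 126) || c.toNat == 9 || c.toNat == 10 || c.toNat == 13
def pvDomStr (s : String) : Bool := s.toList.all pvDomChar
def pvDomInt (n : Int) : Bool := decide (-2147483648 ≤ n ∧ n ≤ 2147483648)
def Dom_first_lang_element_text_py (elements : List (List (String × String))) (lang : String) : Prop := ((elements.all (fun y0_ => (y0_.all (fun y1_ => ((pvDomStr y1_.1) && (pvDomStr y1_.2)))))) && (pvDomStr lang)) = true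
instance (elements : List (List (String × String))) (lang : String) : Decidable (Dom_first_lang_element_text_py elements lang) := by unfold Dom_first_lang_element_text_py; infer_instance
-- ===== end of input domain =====

-- B merges A's two sequential scans into one pass with an explicit found flag and fallback (objective: simpler).

-- shared dict primitives on the association-list encoding of a Python dict
-- 'k in e'
def pvContains (e : List (String × String)) (k : String) : Bool := e.any (fun p => p.1 == k)
-- 'e[k]' under a preceding 'k in e' guard (first match; "" unreachable under the guard)
def pvGetKey (e : List (String × String)) (k : String) : String := ((e.find? (fun p => p.1 == k)).map (fun p => p.2)).getD ""

-- ===== PORT A =====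
-- A's first loop: return e['text'] at the first e with lang in e and 'text' in e
def aScan1 (lang : String) : List (List (String × String)) → Option String
  | [] => none
  | e :: rest =>
    if pvContains e lang then
      if pvContains e "text" then some (pvGetKey e "text") else aScan1 lang rest
    else aScan1 lang rest

-- A's second loop: return e['text'] at the first e with 'text' in e
def aScan2 : List (List (String × String)) → Option String
  | [] => none
  | e :: rest => if pvContains e "text" then some (pvGetKey e "text") else aScan2 rest

def first_lang_element_text_py (elements : List (List (String × String))) (lang : String) : String :=
  match aScan1 lang elements with
  | some t => t
  | none =>
    match aScan2 elements with
    | some t => t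
    | none => ""

-- ===== PORT B =====
-- B's single loop with state (found, fallback)
def bLoop (lang : String) : List (List (String × String)) → Bool → String → String
  | [], found, fallback => if found then fallback else ""
  | e :: rest, found, fallback =>
    if pvContains e "text" then
      if pvContains e lang then pvGetKey e "text"
      else if !found then bLoop lang rest true (pvGetKey e "text")
      else bLoop lang rest found fallback
    else bLoop lang rest found fallback

def first_lang_element_text_py_alt (elements : List (List (String × String))) (lang : String) : String :=
  bLoop lang elements false ""

-- ===== PRECONDITION & SPEC =====
def Spec_first_lang_element_text_py (elements : List (List (String × String))) (lang : String) (out : String) : Prop := out = first_lang_element_text_py_alt elements lang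
instance (elements : List (List (String × String))) (lang : String) (out : String) : Decidable (Spec_first_lang_element_text_py elements lang out) := by unfold Spec_first_lang_element_text_py; infer_instance

-- ===== CLAIM (what is proved, stated in full; the proofs are below) =====
def Claim_equal_first_lang_element_text_py : Prop := ∀ (elements : List (List (String × String))) (lang : String), Dom_first_lang_element_text_py elements lang → Spec_first_lang_element_text_py elements lang (first_lang_element_text_py elements lang)

-- ===== LEMMAS AND PROOFS =====

-- loop invariant: B's single pass equals A's two-scan composition, with the
-- carried (found, fallback) state taking the place of the second scan
theorem bLoop_eq (lang : String) (els : List (List (String × String))) :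
    ∀ (found : Bool) (fallback : String),
      bLoop lang els found fallback =
        match aScan1 lang els with
        | some t => t
        | none =>
          if found then fallback else
            match aScan2 els with
            | some t => t
            | none => "" := by
  induction els with
  | nil => intro found fallback; simp [bLoop, aScan1, aScan2]
  | cons e rest ih =>
    intro found fallback
    by_cases ht : pvContains e "text" = true
    · by_cases hl : pvContains e lang = true
      · simp [bLoop, aScan1, ht, hl]
      · cases found with
        | false => simp [bLoop, aScan1, aScan2, ht, hl, ih]
        | true => simp [bLoop, aScan1, aScan2, ht, hl, ih]
    · by_cases hl : pvContains e lang = true <;>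
        simp [bLoop, aScan1, aScan2, ht, hl, ih]

-- ===== VERDICT (by name: the statement is the Claim_ definition above) =====
theorem first_lang_element_text_py_spec : Claim_equal_first_lang_element_text_py := by
  intro elements lang _
  show _ = _
  rw [first_lang_element_text_py_alt, bLoop_eq]
  simp [first_lang_element_text_py]
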